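-- pv_equiv track=rewrite | github.com/baruadiego/Ahorcado-Pygame-TPFinal | funciones_pantallas.py | calcular_margen
-- ===== SOURCE A (Python) =====
-- def calcular_margen (palabra: str) -> tuple[int, int]:
--     """
--     Calcula la posición x y el ancho máximo basado en la longitud de una palabra.
--
--     Args:
--         palabra (str): La palabra de la cual se calculará el margen.
--
--     Returns:
--         tuple[int, int]: Una tupla con la posición x y el ancho máximo calculado.
--     """
--     pos_x = 340
--     ancho_maximo = 10
--     for i in range (len(palabra)):
--         pos_x -=  25
--         ancho_maximo += 50
--
--         if pos_x == 140:
--             break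
--
--     return pos_x, ancho_maximo
-- ===== SOURCE B (Python) =====
-- def calcular_margen(palabra: str) -> tuple[int, int]:
--     n = min(len(palabra), 8)
--     return 340 - 25 * n, 10 + 50 * n
-- ===== Notes on version B (the rewrite author's own statement) =====
-- stated objective: simpler
-- what changed: Replaced the per-character loop with break by the closed form n = min(len(palabra), 8), returning (340 - 25*n, 10 + 50*n) directly.
import Mathlib
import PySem

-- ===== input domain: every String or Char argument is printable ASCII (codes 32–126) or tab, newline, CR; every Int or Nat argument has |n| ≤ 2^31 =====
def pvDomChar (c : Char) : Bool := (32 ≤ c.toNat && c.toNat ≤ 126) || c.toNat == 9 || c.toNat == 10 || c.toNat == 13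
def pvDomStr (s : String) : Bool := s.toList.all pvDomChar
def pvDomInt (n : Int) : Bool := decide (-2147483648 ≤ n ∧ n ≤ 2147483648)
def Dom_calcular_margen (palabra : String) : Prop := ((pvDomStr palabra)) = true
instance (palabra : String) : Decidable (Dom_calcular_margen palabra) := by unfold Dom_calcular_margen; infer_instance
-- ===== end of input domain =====

-- B replaces A's bounded loop with the closed form n = min(len, 8); objective: simpler.

-- ===== PORT A =====
-- loop over range(len(palabra)): each step pos_x -= 25, ancho_maximo += 50, break when pos_x == 140
def pvALoop_calcular_margen : Nat → Int → Int → Int × Int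
  | 0, pos_x, ancho_maximo => (pos_x, ancho_maximo)
  | n + 1, pos_x, ancho_maximo =>
    if pos_x - 25 == 140 then (pos_x - 25, ancho_maximo + 50)
    else pvALoop_calcular_margen n (pos_x - 25) (ancho_maximo + 50)

def calcular_margen (palabra : String) : Int × Int :=
  pvALoop_calcular_margen palabra.toList.length 340 10

-- ===== PORT B =====
def calcular_margen_alt (palabra : String) : Int × Int :=
  let n : Int := min (palabra.toList.length : Int) 8
  (340 - 25 * n, 10 + 50 * n)

-- ===== PRECONDITION & SPEC =====
def Spec_calcular_margen (palabra : String) (out : Int × Int) : Prop := out = calcular_margen_alt palabra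
instance (palabra : String) (out : Int × Int) : Decidable (Spec_calcular_margen palabra out) := by unfold Spec_calcular_margen; infer_instance

-- ===== CLAIM (what is proved, stated in full; the proofs are below) =====
def Claim_equal_calcular_margen : Prop := ∀ (palabra : String), Dom_calcular_margen palabra → Spec_calcular_margen palabra (calcular_margen palabra)

-- ===== LEMMAS AND PROOFS =====
theorem pvALoop_closed (k i : Nat) (hi : i < 8) :
    pvALoop_calcular_margen k (340 - 25 * (i : Int)) (10 + 50 * (i : Int)) =
      (340 - 25 * (min ((i : Int) + k) 8), 10 + 50 * (min ((i : Int) + k) 8)) := by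
  induction k generalizing i with
  | zero =>
    simp only [pvALoop_calcular_margen, Prod.mk.injEq]
    constructor <;> omega
  | succ n ih =>
    simp only [pvALoop_calcular_margen, beq_iff_eq]
    split_ifs with h
    · simp only [Prod.mk.injEq]
      push_cast
      constructor <;> omega
    · have hi' : i + 1 < 8 := by omega
      have e1 : 340 - 25 * (i : Int) - 25 = 340 - 25 * ((i + 1 : Nat) : Int) := by push_cast; ring
      have e2 : 10 + 50 * (i : Int) + 50 = 10 + 50 * ((i + 1 : Nat) : Int) := by push_cast; ring
      rw [e1, e2, ih (i + 1) hi']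
      simp only [Prod.mk.injEq]
      push_cast
      constructor <;> omega

-- ===== VERDICT =====
theorem calcular_margen_spec : Claim_equal_calcular_margen := by
  intro palabra _
  unfold Spec_calcular_margen calcular_margen calcular_margen_alt
  have h := pvALoop_closed palabra.toList.length 0 (by omega)
  simp only [Nat.cast_zero, zero_add, mul_zero, sub_zero, add_zero] at h
  exact h
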